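-- pv_equiv track=rewrite | github.com/kezniklm/DGA-Detector | tests/send_dataset.py | validate_and_correct_domain_name
-- ===== SOURCE A (Python) =====
-- def validate_and_correct_domain_name(domain_name: str) -> str:
--     """
--     Validate and correct the domain name.
--
--     Args:
--         domain_name (str): Domain name to be validated and corrected.
--
--     Returns:
--         str: Corrected domain name.
--     """
--     if len(domain_name) > 255:
--         raise ValueError("Domain name exceeds the maximum length of 255 characters")
--
--     labels = domain_name.split(".")
--     corrected_labels = []
--     for label in labels:
--         while len(label) > 63:
--             corrected_labels.append(label[:63])  # Split label into 63 character chunks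
--             label = label[63:]
--         corrected_labels.append(label)
--     return ".".join(corrected_labels)
-- ===== SOURCE B (Python) =====
-- def validate_and_correct_domain_name(domain_name: str) -> str:
--     """Streaming rewrite: one pass over the characters with a run counter,
--     inserting '.' after every 63 consecutive non-dot characters; no split/join."""
--     if len(domain_name) > 255:
--         raise ValueError("Domain name exceeds the maximum length of 255 characters")
--
--     out = []
--     run = 0
--     for ch in domain_name:
--         if ch == '.':
--             run = 0
--         elif run == 63:
--             out.append('.')
--             run = 1
--         else:
--             run += 1
--         out.append(ch)
--     return ''.join(out)
-- ===== Notes on version B (the rewrite author's own statement) =====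
-- stated objective: alternative
-- what changed: Replaced A's split('.') / per-label while-loop tail re-slicing / join('.') pipeline with a single streaming pass over the characters that keeps a run counter and emits a '.' whenever 63 consecutive non-dot characters have passed, building the output once with no intermediate label lists.
import Mathlib
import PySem

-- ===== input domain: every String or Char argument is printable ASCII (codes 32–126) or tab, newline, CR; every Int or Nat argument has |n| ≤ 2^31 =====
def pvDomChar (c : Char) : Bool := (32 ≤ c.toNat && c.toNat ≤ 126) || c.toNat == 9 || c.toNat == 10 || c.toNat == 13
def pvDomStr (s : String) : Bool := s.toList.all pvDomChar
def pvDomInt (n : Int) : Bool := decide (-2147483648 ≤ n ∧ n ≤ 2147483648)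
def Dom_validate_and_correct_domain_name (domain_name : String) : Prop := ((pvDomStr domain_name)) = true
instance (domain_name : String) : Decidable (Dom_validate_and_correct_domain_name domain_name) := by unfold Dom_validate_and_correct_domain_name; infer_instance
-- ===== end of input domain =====

-- B replaces A's split('.') / per-label chunking while-loop / join('.') pipeline by a single
-- streaming pass over the characters with a run counter (objective: simpler, one pass, no
-- intermediate label lists); return values agree on Pre_ (len ≤ 255).

-- ===== PORT A =====
-- inner `while len(label) > 63: corrected_labels.append(label[:63]); label = label[63:]`
-- followed by `corrected_labels.append(label)`; label[:63] / label[63:] are take/drop.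
def pvWhileChunk (acc : List (List Char)) (label : List Char) : List (List Char) :=
  if 63 < label.length then
    pvWhileChunk (acc ++ [label.take 63]) (label.drop 63)
  else
    acc ++ [label]
termination_by label.length
decreasing_by simp [List.length_drop]; omega

-- the `len > 255` branch raises ValueError: excluded by Pre_ below
def validate_and_correct_domain_name (domain_name : String) : String :=
  let labels := PySem.Chars.splitOn domain_name.toList ['.']
  let corrected_labels := labels.foldl pvWhileChunk []
  String.ofList (PySem.Chars.join ['.'] corrected_labels)

-- ===== PORT B =====
-- loop body: `if ch=='.': run=0  elif run==63: out.append('.'); run=1  else: run+=1`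
-- then `out.append(ch)` — state is (out, run)
def pvRunStep (st : List Char × Nat) (ch : Char) : List Char × Nat :=
  if ch = '.' then (st.1 ++ [ch], 0)
  else if st.2 = 63 then (st.1 ++ ['.'] ++ [ch], 1)
  else (st.1 ++ [ch], st.2 + 1)

-- the `len > 255` branch raises ValueError: excluded by Pre_ below
def validate_and_correct_domain_name_alt (domain_name : String) : String :=
  String.ofList (domain_name.toList.foldl pvRunStep ([], 0)).1

-- ===== PRECONDITION & SPEC =====
-- exactly the inputs where A returns (it raises ValueError when len(domain_name) > 255)
def Pre_validate_and_correct_domain_name (domain_name : String) : Prop :=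
  PySem.Str.len domain_name ≤ 255
instance (domain_name : String) : Decidable (Pre_validate_and_correct_domain_name domain_name) := by
  unfold Pre_validate_and_correct_domain_name; infer_instance

def pvWitness_validate_and_correct_domain_name : String := "www.example.com"

def Spec_validate_and_correct_domain_name (domain_name : String) (out : String) : Prop := out = validate_and_correct_domain_name_alt domain_name
instance (domain_name : String) (out : String) : Decidable (Spec_validate_and_correct_domain_name domain_name out) := by unfold Spec_validate_and_correct_domain_name; infer_instance

-- ===== CLAIM (what is proved, stated in full; the proofs are below) =====
def Claim_equal_validate_and_correct_domain_name : Prop := ∀ (domain_name : String), Dom_validate_and_correct_domain_name domain_name → Pre_validate_and_correct_domain_name domain_name → Spec_validate_and_correct_domain_name domain_name (validate_and_correct_domain_name domain_name)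

-- ===== LEMMAS AND PROOFS =====

-- reference chunking (proof-side only): the list of 63-char chunks of a label
def pvChunksRec (l : List Char) : List (List Char) :=
  if 63 < l.length then l.take 63 :: pvChunksRec (l.drop 63) else [l]
termination_by l.length
decreasing_by simp [List.length_drop]; omega

theorem pvWhileChunk_eq (acc : List (List Char)) (l : List Char) :
    pvWhileChunk acc l = acc ++ pvChunksRec l := by
  induction l using pvChunksRec.induct generalizing acc with
  | case1 l h ih =>
      rw [pvWhileChunk, pvChunksRec, if_pos h, if_pos h, ih]
      simp
  | case2 l h =>
      rw [pvWhileChunk, pvChunksRec, if_neg h, if_neg h]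

theorem pvFoldl_whileChunk (labels : List (List Char)) (acc : List (List Char)) :
    labels.foldl pvWhileChunk acc = acc ++ labels.flatMap pvChunksRec := by
  induction labels generalizing acc with
  | nil => simp
  | cons x xs ih =>
      simp only [List.foldl_cons, List.flatMap_cons]
      rw [pvWhileChunk_eq, ih]
      simp

-- proof-side spec of Python's split('.') (single-char separator)
def pvGoSpec (cur : List Char) (s : List Char) : List (List Char) :=
  match s with
  | [] => [cur.reverse]
  | c :: rest => if c = '.' then cur.reverse :: pvGoSpec [] rest else pvGoSpec (c :: cur) rest

theorem pvGo_eq (fuel : Nat) (l cur : List Char) (acc : List (List Char))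
    (h : l.length < fuel) :
    PySem.Chars.splitOn.go ['.'] fuel l cur acc = acc.reverse ++ pvGoSpec cur l := by
  induction fuel generalizing l cur acc with
  | zero => omega
  | succ n ih =>
      cases l with
      | nil => simp [PySem.Chars.splitOn.go, pvGoSpec]
      | cons c rest =>
          rw [PySem.Chars.splitOn.go]
          by_cases hc : c = '.'
          · subst hc
            have hp : (['.'] : List Char).isPrefixOf ('.' :: rest) = true := by
              simp [List.isPrefixOf]
            rw [if_pos hp]
            simp only [List.length_cons, List.length_nil, List.drop_succ_cons, List.drop_zero]
            rw [ih rest [] _ (by simpa using Nat.lt_of_succ_lt_succ (by simpa using h))]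
            simp [pvGoSpec]
          · have hp : (['.'] : List Char).isPrefixOf (c :: rest) = false := by
              simp [List.isPrefixOf, hc]
              intro h'; exact absurd h'.symm hc
            rw [if_neg (by simp [hp])]
            rw [ih rest (c :: cur) acc (by simpa using Nat.lt_of_succ_lt_succ (by simpa using h))]
            simp [pvGoSpec, hc]

theorem pvSplitOn_eq (s : List Char) :
    PySem.Chars.splitOn s ['.'] = pvGoSpec [] s := by
  rw [PySem.Chars.splitOn, pvGo_eq (s.length + 1) s [] [] (by omega)]
  simp

theorem pvGoSpec_cur (s cur : List Char) :
    pvGoSpec cur s = (cur.reverse ++ (pvGoSpec [] s).headI) :: (pvGoSpec [] s).tail := by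
  induction s generalizing cur with
  | nil => simp [pvGoSpec]
  | cons c rest ih =>
      by_cases hc : c = '.'
      · subst hc; simp [pvGoSpec]
      · rw [pvGoSpec, if_neg hc, ih (c :: cur)]
        conv_rhs => rw [pvGoSpec, if_neg hc, ih [c]]
        simp

-- character-level description of pvRunStep's output (proof side)
def pvG (s : List Char) (r : Nat) : List Char :=
  match s with
  | [] => []
  | c :: cs =>
      if c = '.' then '.' :: pvG cs 0
      else if r = 63 then '.' :: c :: pvG cs 1
      else c :: pvG cs (r + 1)

theorem pvFoldl_runStep (s : List Char) (acc : List Char) (r : Nat) :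
    (s.foldl pvRunStep (acc, r)).1 = acc ++ pvG s r := by
  induction s generalizing acc r with
  | nil => simp [pvG]
  | cons c cs ih =>
      simp only [List.foldl_cons]
      by_cases hc : c = '.'
      · subst hc
        rw [show pvRunStep (acc, r) '.' = (acc ++ ['.'], 0) from by simp [pvRunStep]]
        rw [ih]; simp [pvG]
      · by_cases hr : r = 63
        · subst hr
          rw [show pvRunStep (acc, 63) c = (acc ++ ['.'] ++ [c], 1) from by
                simp [pvRunStep, hc]]
          rw [ih]; simp [pvG, hc]
        · rw [show pvRunStep (acc, r) c = (acc ++ [c], r + 1) from by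
                simp [pvRunStep, hc, hr]]
          rw [ih]; simp [pvG, hc, hr]

-- dotting-in within one label, starting at run r (structural on the label)
def pvHead (r : Nat) (l : List Char) : List Char :=
  match l with
  | [] => []
  | c :: cs => if r = 63 then '.' :: c :: pvHead 1 cs else c :: pvHead (r + 1) cs

def pvTail (ls : List (List Char)) : List Char :=
  ls.flatMap (fun l => '.' :: pvHead 0 l)

theorem pvHead_peel (l : List Char) (r : Nat) (hr : r ≤ 63) :
    pvHead r l = l.take (63 - r) ++
      (if l.length ≤ 63 - r then [] else '.' :: pvHead 0 (l.drop (63 - r))) := by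
  induction l generalizing r with
  | nil => simp [pvHead]
  | cons c cs ih =>
      by_cases hr63 : r = 63
      · subst hr63
        rw [pvHead, if_pos rfl]
        have h0 : pvHead 0 (c :: cs) = c :: pvHead 1 cs := by
          rw [pvHead, if_neg (by omega)]
        simp only [Nat.sub_self, List.take_zero, List.drop_zero, List.length_cons,
          Nat.le_zero, List.nil_append]
        rw [if_neg (by omega), h0]
      · have h1 : r + 1 ≤ 63 := by omega
        rw [pvHead, if_neg hr63, ih (r + 1) h1]
        have hk : 63 - r = (63 - (r + 1)) + 1 := by omega
        rw [hk]
        simp only [List.take_succ_cons, List.length_cons, List.drop_succ_cons,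
          List.cons_append, Nat.add_le_add_iff_right]

theorem pvChunksRec_ne_nil (l : List Char) : pvChunksRec l ≠ [] := by
  rw [pvChunksRec]
  split <;> simp

theorem pvJoin_append (xs ys : List (List Char)) (hx : xs ≠ []) (hy : ys ≠ []) :
    PySem.Chars.join ['.'] (xs ++ ys) =
      PySem.Chars.join ['.'] xs ++ '.' :: PySem.Chars.join ['.'] ys := by
  induction xs with
  | nil => exact absurd rfl hx
  | cons a xs ih =>
      cases xs with
      | nil =>
          cases ys with
          | nil => exact absurd rfl hy
          | cons b ys => simp [PySem.Chars.join, List.intercalate]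
      | cons b xs' =>
          have := ih (by simp)
          simp only [List.cons_append] at this ⊢
          rw [PySem.Chars.join_cons_cons, this, PySem.Chars.join_cons_cons]
          simp

theorem pvHead_zero_eq_join (l : List Char) :
    pvHead 0 l = PySem.Chars.join ['.'] (pvChunksRec l) := by
  induction l using pvChunksRec.induct with
  | case1 l h ih =>
      rw [pvChunksRec, if_pos h]
      rw [pvHead_peel l 0 (by omega)]
      simp only [Nat.sub_zero]
      rw [if_neg (by omega), ih]
      have hne := pvChunksRec_ne_nil (l.drop 63)
      have : (l.take 63 :: pvChunksRec (l.drop 63)) = [l.take 63] ++ pvChunksRec (l.drop 63) := by simp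
      rw [this, pvJoin_append [l.take 63] _ (by simp) hne]
      simp [PySem.Chars.join, List.intercalate]
  | case2 l h =>
      rw [pvChunksRec, if_neg h]
      rw [pvHead_peel l 0 (by omega)]
      simp only [Nat.sub_zero]
      rw [if_pos (by omega)]
      simp [PySem.Chars.join, List.intercalate, List.take_of_length_le (by omega : l.length ≤ 63)]

theorem pvJoin_flatMap (t : List (List Char)) (h : List Char) :
    PySem.Chars.join ['.'] ((h :: t).flatMap pvChunksRec) = pvHead 0 h ++ pvTail t := by
  induction t generalizing h with
  | nil => simp [pvTail, pvHead_zero_eq_join]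
  | cons h2 t' ih =>
      simp only [List.flatMap_cons]
      rw [show pvChunksRec h ++ (pvChunksRec h2 ++ (t'.flatMap pvChunksRec)) =
            pvChunksRec h ++ ((h2 :: t').flatMap pvChunksRec) by simp]
      rw [pvJoin_append _ _ (pvChunksRec_ne_nil h) (by
            have := pvChunksRec_ne_nil h2
            simp only [List.flatMap_cons]
            intro he
            exact this (List.append_eq_nil_iff.mp he).1)]
      rw [ih h2, ← pvHead_zero_eq_join]
      simp [pvTail]

theorem pvMain (s : List Char) (r : Nat) :
    pvG s r = pvHead r ((pvGoSpec [] s).headI) ++ pvTail ((pvGoSpec [] s).tail) := by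
  induction s generalizing r with
  | nil => simp [pvG, pvGoSpec, pvHead, pvTail]
  | cons c cs ih =>
      by_cases hc : c = '.'
      · subst hc
        rw [pvG]
        conv_rhs => rw [pvGoSpec]
        simp only [if_pos rfl]
        rw [pvGoSpec_cur cs []]
        simp only [List.reverse_nil, List.nil_append]
        rw [ih 0]
        simp [pvTail, pvHead]
      · rw [pvG]
        simp only [if_neg hc]
        conv_rhs => rw [pvGoSpec]
        simp only [if_neg hc]
        rw [pvGoSpec_cur cs [c]]
        simp only [List.reverse_cons, List.reverse_nil, List.nil_append, List.headI_cons,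
          List.tail_cons, List.singleton_append, pvHead]
        by_cases hr : r = 63
        · subst hr
          simp only [if_pos rfl]
          rw [ih 1]
          simp
        · simp only [if_neg hr]
          rw [ih (r + 1)]
          simp

-- ===== VERDICT (by name: the statement is the Claim_ definition above) =====
theorem validate_and_correct_domain_name_spec : Claim_equal_validate_and_correct_domain_name := by
  intro domain_name _ _
  unfold Spec_validate_and_correct_domain_name
  unfold validate_and_correct_domain_name validate_and_correct_domain_name_alt
  simp only
  rw [pvFoldl_whileChunk, List.nil_append, pvFoldl_runStep, List.nil_append, pvSplitOn_eq]
  have hne : pvGoSpec [] domain_name.toList =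
      (pvGoSpec [] domain_name.toList).headI :: (pvGoSpec [] domain_name.toList).tail := by
    rw [pvGoSpec_cur domain_name.toList []]
    simp
  rw [hne, pvJoin_flatMap, ← pvMain]
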